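-- pv_equiv track=rewrite | github.com/hi-rachel/Algorithms | 백준/Silver/3085. 사탕 게임/사탕 게임.py | count_col
-- ===== SOURCE A (Python) =====
-- def count_col(board, n, col):
--     """특정 열에서 최대 연속 길이를 반환"""
--     max_count = 1
--     count = 1
--     for i in range(1, n):
--         if board[i][col] == board[i-1][col]:
--             count += 1
--         else:
--             max_count = max(max_count, count)
--             count = 1
--     return max(max_count, count)
-- ===== SOURCE B (Python) =====
-- def count_col(board, n, col):
--     """Max run length in column `col` among the first n rows, via run-length encoding."""
--     if n <= 1:
--         return 1
--     column = [board[i][col] for i in range(n)]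
--     return max(run_lengths(column))
--
--
-- def run_lengths(xs):
--     """Lengths of the maximal runs of equal consecutive elements of xs."""
--     runs = []
--     for v in xs:
--         if runs and runs[-1][0] == v:
--             runs[-1] = (runs[-1][0], runs[-1][1] + 1)
--         else:
--             runs.append((v, 1))
--     return [k for _, k in runs]
-- ===== Notes on version B (the rewrite author's own statement) =====
-- stated objective: alternative
-- what changed: Instead of maintaining a running counter and running maximum over indexed neighbour comparisons, B materializes the column, run-length-encodes it into explicit (value, length) runs, and returns the max of the run lengths.
import Mathlib
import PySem

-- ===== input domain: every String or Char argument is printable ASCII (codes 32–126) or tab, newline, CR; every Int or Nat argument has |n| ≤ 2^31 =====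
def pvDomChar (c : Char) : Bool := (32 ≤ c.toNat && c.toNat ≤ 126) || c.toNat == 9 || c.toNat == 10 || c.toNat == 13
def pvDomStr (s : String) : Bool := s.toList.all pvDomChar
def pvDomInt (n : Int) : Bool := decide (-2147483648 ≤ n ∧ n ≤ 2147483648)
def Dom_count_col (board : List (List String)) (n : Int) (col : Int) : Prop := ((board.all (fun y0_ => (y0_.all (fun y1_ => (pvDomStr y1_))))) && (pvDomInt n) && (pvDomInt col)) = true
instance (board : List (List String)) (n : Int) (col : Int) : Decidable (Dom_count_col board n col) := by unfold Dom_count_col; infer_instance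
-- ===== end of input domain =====

-- B replaces A's running-counter/running-max index walk by materializing the column,
-- run-length-encoding it, and taking the max of the run lengths (alternative decomposition, same cost).


-- ===== PORT A =====
-- board[i][col] is ported as an Option-valued lookup (none = IndexError); under Pre_ it is always some.
def count_col (board : List (List String)) (n : Int) (col : Int) : Int :=
  let r := (PySem.List.pyRange 1 n 1).foldl
    (fun (st : Int × Int) i =>
      if ((PySem.List.pyGet? board i).bind (fun row => PySem.List.pyGet? row col))
         = ((PySem.List.pyGet? board (i - 1)).bind (fun row => PySem.List.pyGet? row col))
      then (st.1, st.2 + 1)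
      else (max st.1 st.2, 1))
    (1, 1)
  max r.1 r.2

-- ===== PORT B =====
-- run_lengths' loop body: mutate the last run in place or append a fresh run.
def runStep (runs : List (Option String × Int)) (v : Option String) : List (Option String × Int) :=
  match runs.getLast? with
  | some (u, k) => if u = v then runs.dropLast ++ [(u, k + 1)] else runs ++ [(v, 1)]
  | none => runs ++ [(v, 1)]

def run_lengths (xs : List (Option String)) : List Int :=
  (xs.foldl runStep []).map (fun p => p.2)

def count_col_alt (board : List (List String)) (n : Int) (col : Int) : Int :=
  if n ≤ 1 then 1
  else
    let column := (PySem.List.pyRange 0 n 1).map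
      (fun i => (PySem.List.pyGet? board i).bind (fun row => PySem.List.pyGet? row col))
    (PySem.List.max? (run_lengths column) (fun x => x)).getD 1

-- ===== PRECONDITION & SPEC =====
-- Pre_ excludes exactly the inputs where Python A raises IndexError: when n > 1 it indexes
-- board[0..n-1] and each such row at col, so those indexes must all be in range.
def Pre_count_col (board : List (List String)) (n : Int) (col : Int) : Prop :=
  1 < n → (n ≤ (board.length : Int) ∧ ∀ row ∈ board.take n.toNat, PySem.Raise.InRange row.length col)
instance (board : List (List String)) (n : Int) (col : Int) : Decidable (Pre_count_col board n col) := by unfold Pre_count_col; infer_instance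

def pvWitness_count_col : List (List String) × Int × Int := ([["a"], ["a"], ["b"]], 3, 0)

def Spec_count_col (board : List (List String)) (n : Int) (col : Int) (out : Int) : Prop := out = count_col_alt board n col
instance (board : List (List String)) (n : Int) (col : Int) (out : Int) : Decidable (Spec_count_col board n col out) := by unfold Spec_count_col; infer_instance

-- ===== CLAIM (what is proved, stated in full; the proofs are below) =====
def Claim_equal_count_col : Prop := ∀ (board : List (List String)) (n : Int) (col : Int), Dom_count_col board n col → Pre_count_col board n col → Spec_count_col board n col (count_col board n col)

-- ===== LEMMAS AND PROOFS =====

-- Front-recursive characterisations used to relate the two ports.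
def extRuns (u : Option String) (c : Int) : List (Option String) → List (Option String × Int)
  | [] => [(u, c)]
  | v :: vs => if u = v then extRuns u (c + 1) vs else (u, c) :: extRuns v 1 vs

def maxRun (u : Option String) (c : Int) : List (Option String) → Int
  | [] => c
  | v :: vs => if u = v then maxRun u (c + 1) vs else max c (maxRun v 1 vs)

def afold : Int × Int → Option String → List (Option String) → Int × Int
  | st, _, [] => st
  | st, u, v :: vs => if v = u then afold (st.1, st.2 + 1) v vs else afold (max st.1 st.2, 1) v vs

lemma foldl_runStep (xs : List (Option String)) :
    ∀ (pre : List (Option String × Int)) (u : Option String) (k : Int),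
      (xs.foldl runStep (pre ++ [(u, k)])) = pre ++ extRuns u k xs := by
  induction xs with
  | nil => intro pre u k; simp [extRuns]
  | cons v vs ih =>
    intro pre u k
    by_cases h : u = v
    · simp [runStep, h, extRuns, ih]
    · have : runStep (pre ++ [(u, k)]) v = (pre ++ [(u, k)]) ++ [(v, 1)] := by
        simp [runStep, h]
      simp only [List.foldl_cons, this]
      rw [List.append_assoc] at *
      have := ih (pre ++ [(u, k)]) v 1
      simpa [extRuns, h, List.append_assoc] using this

lemma afold_max (xs : List (Option String)) :
    ∀ (u : Option String) (mc c : Int),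
      max (afold (mc, c) u xs).1 (afold (mc, c) u xs).2 = max mc (maxRun u c xs) := by
  induction xs with
  | nil => intro u mc c; simp [afold, maxRun]
  | cons v vs ih =>
    intro u mc c
    by_cases h : v = u
    · simp [afold, maxRun, h, ih]
    · have h' : ¬ u = v := fun e => h e.symm
      simp [afold, maxRun, h, h', ih, max_assoc]

lemma foldl_max_shift (l : List Int) : ∀ (c a : Int), l.foldl max (max c a) = max c (l.foldl max a) := by
  induction l with
  | nil => intro c a; rfl
  | cons b bs ih =>
    intro c a
    simp only [List.foldl_cons, max_assoc, ih]

lemma extRuns_max (xs : List (Option String)) :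
    ∀ (u : Option String) (c : Int),
      PySem.List.max? ((extRuns u c xs).map (fun p => p.2)) (fun x => x) = some (maxRun u c xs) := by
  induction xs with
  | nil => intro u c; simp [extRuns, maxRun, PySem.List.max?_id_cons]
  | cons v vs ih =>
    intro u c
    by_cases h : u = v
    · simp [extRuns, maxRun, h, ih]
    · rcases e : (extRuns v 1 vs).map (fun p => p.2) with _ | ⟨a, t⟩
      · have := ih v 1; rw [e] at this; simp [PySem.List.max?] at this
      · have := ih v 1
        rw [e, PySem.List.max?_id_cons] at this
        have hx : extRuns u c (v :: vs) = (u, c) :: extRuns v 1 vs := by simp [extRuns, h]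
        have hm : maxRun u c (v :: vs) = max c (maxRun v 1 vs) := by simp [maxRun, h]
        rw [hx, hm, List.map_cons, e, PySem.List.max?_id_cons, List.foldl_cons,
          foldl_max_shift, Option.some_inj.mp this]

lemma le_maxRun (xs : List (Option String)) : ∀ (u : Option String) (c : Int), c ≤ maxRun u c xs := by
  induction xs with
  | nil => intro u c; simp [maxRun]
  | cons v vs ih =>
    intro u c
    by_cases h : u = v
    · subst h
      simp only [maxRun]
      have := ih u (c + 1); omega
    · simp [maxRun, h]

lemma foldA_eq (board : List (List String)) (n col : Int) :
    ∀ (fuel : Nat) (m : Int), (n - m).toNat = fuel →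
      (PySem.List.pyRange m n 1).foldl
        (fun (st : Int × Int) i =>
          if ((PySem.List.pyGet? board i).bind (fun row => PySem.List.pyGet? row col))
             = ((PySem.List.pyGet? board (i - 1)).bind (fun row => PySem.List.pyGet? row col))
          then (st.1, st.2 + 1)
          else (max st.1 st.2, 1)) st
      = afold st
          ((PySem.List.pyGet? board (m - 1)).bind (fun row => PySem.List.pyGet? row col))
          ((PySem.List.pyRange m n 1).map
            (fun i => (PySem.List.pyGet? board i).bind (fun row => PySem.List.pyGet? row col))) := by
  intro fuel
  induction fuel generalizing st with
  | zero =>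
    intro m hm
    have : n ≤ m := by omega
    rw [PySem.List.pyRange_one_eq_nil this]
    simp [afold]
  | succ f ih =>
    intro m hm
    by_cases hmn : m < n
    · rw [PySem.List.pyRange_one_cons hmn]
      simp only [List.foldl_cons, List.map_cons, afold]
      by_cases h : ((PySem.List.pyGet? board m).bind (fun row => PySem.List.pyGet? row col))
          = ((PySem.List.pyGet? board (m - 1)).bind (fun row => PySem.List.pyGet? row col))
      · rw [if_pos h, if_pos h]
        have := ih (st := (st.1, st.2 + 1)) (m + 1) (by omega)
        simpa using this
      · rw [if_neg h, if_neg h]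
        have := ih (st := (max st.1 st.2, 1)) (m + 1) (by omega)
        simpa using this
    · have : n ≤ m := by omega
      rw [PySem.List.pyRange_one_eq_nil this]
      simp [afold]

-- ===== VERDICT (by name: the statement is the Claim_ definition above) =====
theorem count_col_spec : Claim_equal_count_col := by
  intro board n col _ _
  unfold Spec_count_col count_col count_col_alt
  by_cases hn : n ≤ 1
  · rw [PySem.List.pyRange_one_eq_nil (by omega)]
    simp [hn]
  · rw [if_neg hn]
    set g : Int → Option String :=
      fun i => (PySem.List.pyGet? board i).bind (fun row => PySem.List.pyGet? row col) with hg
    have hcol : (PySem.List.pyRange 0 n 1).map g = g 0 :: (PySem.List.pyRange 1 n 1).map g := by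
      rw [PySem.List.pyRange_one_cons (by omega : (0:Int) < n)]
      simp
    rw [foldA_eq board n col (n - 1).toNat 1 rfl]
    simp only [hcol]
    rw [show (1:Int) - 1 = 0 by norm_num]
    set rest := (PySem.List.pyRange 1 n 1).map g with hrest
    have hruns : (g 0 :: rest).foldl runStep [] = extRuns (g 0) 1 rest := by
      have h0 : runStep [] (g 0) = [] ++ [(g 0, 1)] := by simp [runStep]
      rw [List.foldl_cons, h0, foldl_runStep rest [] (g 0) 1]
      simp
    rw [run_lengths, hruns, extRuns_max rest (g 0) 1]
    have := afold_max rest (g 0) 1 1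
    simp only [Option.getD_some]
    rw [this, max_eq_right (le_maxRun rest (g 0) 1)]
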